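-- pv_equiv track=rewrite | github.com/hyunjine/TIL | 주유소.py | solution
-- ===== SOURCE A (Python) =====
-- def solution(n, dis, price):
--   answer = 0
--   start = 0
--   while start < n:
--     answer += dis[start] * price[start]
--     next = start+1
--     totalDis = 0
--     while next < n and price[start] < price[next]:
--       totalDis += dis[next]
--       next += 1
--     answer += totalDis * price[start]
--     start = next
--   return answer
-- ===== SOURCE B (Python) =====
-- def solution(n, dis, price):
--     answer = 0
--     m = None
--     for i in range(n):
--         p = price[i]
--         if m is None or p < m:
--             m = p
--         answer += dis[i] * m
--     return answer
-- ===== Notes on version B (the rewrite author's own statement) =====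
-- stated objective: simpler
-- what changed: Replaced A's nested segment-jumping while-loops with a single flat pass over indices 0..n-1 that maintains the running minimum price and accumulates dis[i]*min_so_far.
import Mathlib
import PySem

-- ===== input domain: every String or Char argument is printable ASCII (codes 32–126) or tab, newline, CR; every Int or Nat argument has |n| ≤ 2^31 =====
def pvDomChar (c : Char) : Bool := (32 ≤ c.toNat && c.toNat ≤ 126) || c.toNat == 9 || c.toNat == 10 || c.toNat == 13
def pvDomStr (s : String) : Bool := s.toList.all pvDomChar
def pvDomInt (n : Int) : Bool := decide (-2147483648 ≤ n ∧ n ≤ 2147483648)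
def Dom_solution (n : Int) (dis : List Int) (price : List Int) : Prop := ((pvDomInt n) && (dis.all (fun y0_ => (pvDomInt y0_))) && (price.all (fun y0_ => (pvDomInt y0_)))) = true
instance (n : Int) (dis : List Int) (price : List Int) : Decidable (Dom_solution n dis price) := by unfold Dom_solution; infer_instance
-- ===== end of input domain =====

-- B replaces A's nested segment-jumping while-loops with one flat pass keeping the running minimum price (objective: simpler).


-- ===== PORT A =====
-- inner while: `while next < n and price[start] < price[next]: totalDis += dis[next]; next += 1`
-- state = (next, totalDis), returned as (totalDis, next); fuel only makes the loop total
def solInnerGo (n : Int) (dis price : List Int) (pstart : Int) : Nat → Int → Int → Int × Int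
  | 0, next, totalDis => (totalDis, next)
  | fuel + 1, next, totalDis =>
    if next < n ∧ pstart < (PySem.List.pyGet? price next).getD 0 then
      solInnerGo n dis price pstart fuel (next + 1) (totalDis + (PySem.List.pyGet? dis next).getD 0)
    else (totalDis, next)

def solInner (n : Int) (dis price : List Int) (pstart : Int) (next totalDis : Int) : Int × Int :=
  solInnerGo n dis price pstart (n - next).toNat next totalDis

-- outer while over the state (start, answer); fuel only makes the loop total
def solOuterGo (n : Int) (dis price : List Int) : Nat → Int → Int → Int
  | 0, _start, answer => answer
  | fuel + 1, start, answer =>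
    if start < n then
      let pstart := (PySem.List.pyGet? price start).getD 0
      let answer := answer + (PySem.List.pyGet? dis start).getD 0 * pstart
      let r := solInner n dis price pstart (start + 1) 0
      solOuterGo n dis price fuel r.2 (answer + r.1 * pstart)
    else answer

def solution (n : Int) (dis : List Int) (price : List Int) : Int :=
  solOuterGo n dis price n.toNat 0 0

-- ===== PORT B =====
-- `if m is None or p < m: m = p` — the updated minimum
def updMin (m : Option Int) (p : Int) : Int :=
  match m with
  | none => p
  | some v => if p < v then p else v

-- `for i in range(n): p = price[i]; if m is None or p < m: m = p; answer += dis[i] * m`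
-- state = (i, answer, m); fuel only makes the loop total
def altLoopGo (n : Int) (dis price : List Int) : Nat → Int → Int → Option Int → Int
  | 0, _i, answer, _m => answer
  | fuel + 1, i, answer, m =>
    if i < n then
      altLoopGo n dis price fuel (i + 1)
        (answer + (PySem.List.pyGet? dis i).getD 0 * updMin m ((PySem.List.pyGet? price i).getD 0))
        (some (updMin m ((PySem.List.pyGet? price i).getD 0)))
    else answer

def solution_alt (n : Int) (dis : List Int) (price : List Int) : Int :=
  altLoopGo n dis price n.toNat 0 0 none

-- ===== PRECONDITION & SPEC =====
-- Pre_ excludes exactly the inputs where A (and B) raise IndexError: 0 < n with a list shorter than n.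
def Pre_solution (n : Int) (dis : List Int) (price : List Int) : Prop :=
  n ≤ (dis.length : Int) ∧ n ≤ (price.length : Int)
instance (n : Int) (dis : List Int) (price : List Int) : Decidable (Pre_solution n dis price) := by unfold Pre_solution; infer_instance
def pvWitness_solution : Int × List Int × List Int := (3, [2, 3, 1], [5, 2, 4])

def Spec_solution (n : Int) (dis : List Int) (price : List Int) (out : Int) : Prop := out = solution_alt n dis price
instance (n : Int) (dis : List Int) (price : List Int) (out : Int) : Decidable (Spec_solution n dis price out) := by unfold Spec_solution; infer_instance

-- ===== CLAIM (what is proved, stated in full; the proofs are below) =====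
def Claim_equal_solution : Prop := ∀ (n : Int) (dis : List Int) (price : List Int), Dom_solution n dis price → Pre_solution n dis price → Spec_solution n dis price (solution n dis price)

-- ===== LEMMAS AND PROOFS =====

-- the inner loop never moves `next` backwards
theorem solInnerGo_snd_lb (n : Int) (dis price : List Int) (pstart : Int) :
    ∀ (fuel : Nat) (next totalDis : Int), next ≤ (solInnerGo n dis price pstart fuel next totalDis).2 := by
  intro fuel
  induction fuel with
  | zero => intro next td; exact le_refl next
  | succ fuel ih =>
    intro next td
    by_cases h : next < n ∧ pstart < (PySem.List.pyGet? price next).getD 0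
    · have := ih (next + 1) (td + (PySem.List.pyGet? dis next).getD 0)
      simp only [solInnerGo, if_pos h]
      omega
    · simp only [solInnerGo, if_neg h]
      omega

-- with sufficient fuel, on exit of the inner loop its condition is false
theorem solInnerGo_exit (n : Int) (dis price : List Int) (pstart : Int) :
    ∀ (fuel : Nat) (next totalDis : Int), (n - next).toNat ≤ fuel →
      ¬ ((solInnerGo n dis price pstart fuel next totalDis).2 < n ∧
         pstart < (PySem.List.pyGet? price (solInnerGo n dis price pstart fuel next totalDis).2).getD 0) := by
  intro fuel
  induction fuel with
  | zero => intro next td hf hc; simp only [solInnerGo] at hc; omega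
  | succ fuel ih =>
    intro next td hf
    by_cases h : next < n ∧ pstart < (PySem.List.pyGet? price next).getD 0
    · simp only [solInnerGo, if_pos h]
      exact ih (next + 1) (td + (PySem.List.pyGet? dis next).getD 0) (by omega)
    · simp only [solInnerGo, if_neg h]; exact h

-- the inner loop's result does not depend on the fuel, given enough of it
theorem solInnerGo_fuel_irrel (n : Int) (dis price : List Int) (pstart : Int) :
    ∀ (f1 f2 : Nat) (next totalDis : Int), (n - next).toNat ≤ f1 → (n - next).toNat ≤ f2 →
      solInnerGo n dis price pstart f1 next totalDis = solInnerGo n dis price pstart f2 next totalDis := by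
  intro f1
  induction f1 with
  | zero =>
    intro f2 next td h1 _
    cases f2 with
    | zero => rfl
    | succ f2 =>
      have h : ¬ (next < n ∧ pstart < (PySem.List.pyGet? price next).getD 0) := by
        intro hc; omega
      simp only [solInnerGo, if_neg h]
  | succ f1 ih =>
    intro f2 next td h1 h2
    cases f2 with
    | zero =>
      have h : ¬ (next < n ∧ pstart < (PySem.List.pyGet? price next).getD 0) := by
        intro hc; omega
      simp only [solInnerGo, if_neg h]
    | succ f2 =>
      by_cases h : next < n ∧ pstart < (PySem.List.pyGet? price next).getD 0
      · simp only [solInnerGo, if_pos h]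
        exact ih f2 (next + 1) (td + (PySem.List.pyGet? dis next).getD 0) (by omega) (by omega)
      · simp only [solInnerGo, if_neg h]

-- B's loop result does not depend on the fuel, given enough of it
theorem altLoopGo_fuel_irrel (n : Int) (dis price : List Int) :
    ∀ (f1 f2 : Nat) (i ans : Int) (m : Option Int), (n - i).toNat ≤ f1 → (n - i).toNat ≤ f2 →
      altLoopGo n dis price f1 i ans m = altLoopGo n dis price f2 i ans m := by
  intro f1
  induction f1 with
  | zero =>
    intro f2 i ans m h1 _
    cases f2 with
    | zero => rfl
    | succ f2 =>
      have h : ¬ i < n := by omega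
      simp only [altLoopGo, if_neg h]
  | succ f1 ih =>
    intro f2 i ans m h1 h2
    cases f2 with
    | zero =>
      have h : ¬ i < n := by omega
      simp only [altLoopGo, if_neg h]
    | succ f2 =>
      by_cases h : i < n
      · simp only [altLoopGo, if_pos h]
        exact ih f2 (i + 1) _ _ (by omega) (by omega)
      · simp only [altLoopGo, if_neg h]

-- B's flat loop, run across one of A's inner segments with m = some pstart, accumulates exactly totalDis * pstart
theorem inner_bridge (n : Int) (dis price : List Int) (pstart : Int) :
    ∀ (fuel : Nat) (next totalDis ans : Int), (n - next).toNat ≤ fuel →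
      altLoopGo n dis price fuel next (ans + totalDis * pstart) (some pstart) =
        altLoopGo n dis price (n - (solInnerGo n dis price pstart fuel next totalDis).2).toNat
          (solInnerGo n dis price pstart fuel next totalDis).2
          (ans + (solInnerGo n dis price pstart fuel next totalDis).1 * pstart) (some pstart) := by
  intro fuel
  induction fuel with
  | zero =>
    intro next td ans hf
    simp only [solInnerGo]
    exact altLoopGo_fuel_irrel n dis price 0 (n - next).toNat next _ (some pstart)
      (by omega) (le_refl _)
  | succ fuel ih =>
    intro next td ans hf
    by_cases h : next < n ∧ pstart < (PySem.List.pyGet? price next).getD 0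
    · simp only [solInnerGo, if_pos h]
      rw [show (altLoopGo n dis price (fuel + 1) next (ans + td * pstart) (some pstart))
            = altLoopGo n dis price fuel (next + 1)
                (ans + td * pstart + (PySem.List.pyGet? dis next).getD 0
                  * updMin (some pstart) ((PySem.List.pyGet? price next).getD 0))
                (some (updMin (some pstart) ((PySem.List.pyGet? price next).getD 0)))
          from by simp only [altLoopGo, if_pos h.1]]
      have hp : ¬ (PySem.List.pyGet? price next).getD 0 < pstart := by omega
      rw [show updMin (some pstart) ((PySem.List.pyGet? price next).getD 0) = pstart from by
        simp [updMin, hp]]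
      rw [show ans + td * pstart + (PySem.List.pyGet? dis next).getD 0 * pstart
            = ans + (td + (PySem.List.pyGet? dis next).getD 0) * pstart from by ring]
      exact ih (next + 1) (td + (PySem.List.pyGet? dis next).getD 0) ans (by omega)
    · simp only [solInnerGo, if_neg h]
      exact altLoopGo_fuel_irrel n dis price (fuel + 1) (n - next).toNat next _ (some pstart)
        (by omega) (by omega)

-- A's outer loop equals B's flat loop whenever the carried minimum dominates the next start price
theorem outer_eq (n : Int) (dis price : List Int) :
    ∀ (fuel : Nat) (start ans : Int) (m : Option Int), (n - start).toNat ≤ fuel →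
      (start < n → ∀ v, m = some v → (PySem.List.pyGet? price start).getD 0 ≤ v) →
      solOuterGo n dis price fuel start ans = altLoopGo n dis price fuel start ans m := by
  intro fuel
  induction fuel with
  | zero => intro start ans m _ _; rfl
  | succ fuel ih =>
    intro start ans m hf hm
    by_cases hs : start < n
    · simp only [solOuterGo, altLoopGo, if_pos hs]
      have hm' : updMin m ((PySem.List.pyGet? price start).getD 0)
          = (PySem.List.pyGet? price start).getD 0 := by
        match m with
        | none => rfl
        | some v =>
          have hv := hm hs v rfl
          by_cases hlt : (PySem.List.pyGet? price start).getD 0 < v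
          · simp [updMin, hlt]
          · simp only [updMin, if_neg hlt]; omega
      rw [hm']
      have hfi : (n - (start + 1)).toNat ≤ fuel := by omega
      unfold solInner
      rw [solInnerGo_fuel_irrel n dis price ((PySem.List.pyGet? price start).getD 0)
        (n - (start + 1)).toNat fuel (start + 1) 0 (le_refl _) hfi]
      have hb := inner_bridge n dis price ((PySem.List.pyGet? price start).getD 0) fuel (start + 1) 0
        (ans + (PySem.List.pyGet? dis start).getD 0 * (PySem.List.pyGet? price start).getD 0) hfi
      rw [show ans + (PySem.List.pyGet? dis start).getD 0 * (PySem.List.pyGet? price start).getD 0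
            + 0 * (PySem.List.pyGet? price start).getD 0
            = ans + (PySem.List.pyGet? dis start).getD 0 * (PySem.List.pyGet? price start).getD 0
          from by ring] at hb
      rw [hb]
      have hlb := solInnerGo_snd_lb n dis price ((PySem.List.pyGet? price start).getD 0) fuel (start + 1) 0
      rw [altLoopGo_fuel_irrel n dis price
        (n - (solInnerGo n dis price ((PySem.List.pyGet? price start).getD 0) fuel (start + 1) 0).2).toNat
        fuel _ _ (some ((PySem.List.pyGet? price start).getD 0)) (le_refl _) (by omega)]
      apply ih
      · omega
      · intro h2 v hv
        cases hv
        have hex := solInnerGo_exit n dis price ((PySem.List.pyGet? price start).getD 0) fuel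
          (start + 1) 0 hfi
        omega
    · simp only [solOuterGo, altLoopGo, if_neg hs]

theorem solution_spec : Claim_equal_solution := by
  intro n dis price _ _
  unfold Spec_solution solution solution_alt
  exact outer_eq n dis price n.toNat 0 0 none (by omega) (by intro _ v hv; cases hv)
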